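-- pv_equiv track=rewrite | github.com/zPaw/halite-III-rank-visualizer | main.py | trim_two_data
-- ===== SOURCE A (Python) =====
-- def trim_two_data(data_1, data_2):
-- 	trimmed_data_1 = []
-- 	trimmed_data_2 = []
-- 	for i in range(len(data_1)):
-- 		if i == 0:
-- 			trimmed_data_1.append(data_1[i])
-- 			trimmed_data_2.append(data_2[i])
-- 		elif i == len(data_1)-1:
-- 			trimmed_data_1.append(data_1[i])
-- 			trimmed_data_2.append(data_2[i])
-- 		elif not (data_1[i] == data_1[i+1] and data_1[i] == data_1[i-1]):
-- 			trimmed_data_1.append(data_1[i])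
-- 			trimmed_data_2.append(data_2[i])
-- 	return (trimmed_data_1, trimmed_data_2)
-- ===== SOURCE B (Python) =====
-- def trim_two_data(data_1, data_2):
--     # Scan data_1 into maximal runs of equal consecutive values and keep
--     # only each run's first and last index; then index both lists there.
--     n = len(data_1)
--     kept = []
--     start = 0
--     while start < n:
--         end = start
--         while end + 1 < n and data_1[end + 1] == data_1[start]:
--             end += 1
--         if end != start:
--             kept.append(start)
--             kept.append(end)
--         else:
--             kept.append(start)
--         start = end + 1
--     return ([data_1[i] for i in kept], [data_2[i] for i in kept])
-- ===== Notes on version B (the rewrite author's own statement) =====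
-- stated objective: alternative
-- what changed: Replaces the per-index neighbor-equality test with a run-based scan: data_1 is split into maximal runs of equal consecutive values, each run contributes its first and last index, and both outputs are built by indexing at those kept indices.
import Mathlib
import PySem

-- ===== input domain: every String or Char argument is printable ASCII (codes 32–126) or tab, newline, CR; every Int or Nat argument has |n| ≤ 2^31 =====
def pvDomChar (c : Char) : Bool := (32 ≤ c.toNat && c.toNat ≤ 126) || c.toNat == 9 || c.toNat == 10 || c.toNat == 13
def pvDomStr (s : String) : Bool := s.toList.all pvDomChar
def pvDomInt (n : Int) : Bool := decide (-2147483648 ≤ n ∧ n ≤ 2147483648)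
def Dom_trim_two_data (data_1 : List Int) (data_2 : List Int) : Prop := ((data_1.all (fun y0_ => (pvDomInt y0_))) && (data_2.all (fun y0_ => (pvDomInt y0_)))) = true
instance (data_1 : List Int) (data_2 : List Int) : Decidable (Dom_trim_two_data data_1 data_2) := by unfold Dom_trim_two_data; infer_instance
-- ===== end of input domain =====

-- B replaces A's per-index neighbor-equality test by a scan over maximal runs of
-- equal consecutive values, keeping each run's first and last index (alternative
-- decomposition, same cost). Pre_ excludes inputs where Python A raises IndexError.


-- ===== PORT A =====
-- list indexing data_1[i] / data_2[i]: i here is a Nat from range(len(data_1));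
-- .getD i 0 is exact for i < length; data_2 accesses out of range (Python IndexError)
-- are excluded by Pre_trim_two_data.
def trim_two_data (data_1 : List Int) (data_2 : List Int) : List Int × List Int :=
  (List.range data_1.length).foldl
    (fun (acc : List Int × List Int) i =>
      if i = 0 then
        (acc.1 ++ [data_1.getD i 0], acc.2 ++ [data_2.getD i 0])
      else if i = data_1.length - 1 then
        (acc.1 ++ [data_1.getD i 0], acc.2 ++ [data_2.getD i 0])
      else if ¬ (data_1.getD i 0 = data_1.getD (i+1) 0 ∧ data_1.getD i 0 = data_1.getD (i-1) 0) then
        (acc.1 ++ [data_1.getD i 0], acc.2 ++ [data_2.getD i 0])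
      else acc)
    ([], [])

-- ===== PORT B =====
-- inner while loop: extend `e` while data_1[e+1] == data_1[start]
def bRunEnd (d : List Int) (v : Int) (e : Nat) : Nat :=
  if e + 1 < d.length then
    if d.getD (e+1) 0 = v then bRunEnd d v (e+1) else e
  else e
termination_by d.length - e

theorem bRunEnd_ge (d : List Int) (v : Int) (e : Nat) : e ≤ bRunEnd d v e := by
  fun_induction bRunEnd with
  | case1 e h1 h2 ih => omega
  | case2 => omega
  | case3 => omega

-- outer while loop: collect run-boundary indices
def bKept (d : List Int) (start : Nat) : List Nat :=
  if h : start < d.length then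
    let e := bRunEnd d (d.getD start 0) start
    (if e ≠ start then [start, e] else [start]) ++ bKept d (e+1)
  else []
termination_by d.length - start
decreasing_by
  have := bRunEnd_ge d (d.getD start 0) start
  omega

def trim_two_data_alt (data_1 : List Int) (data_2 : List Int) : List Int × List Int :=
  let kept := bKept data_1 0
  (kept.map (fun i => data_1.getD i 0), kept.map (fun i => data_2.getD i 0))

-- ===== PRECONDITION & SPEC =====
-- Pre_ excludes exactly the inputs on which Python A raises IndexError
-- (data_2 shorter than data_1 and data_1 nonempty); B raises there too.
def Pre_trim_two_data (data_1 : List Int) (data_2 : List Int) : Prop :=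
  data_1.length ≤ data_2.length
instance (data_1 : List Int) (data_2 : List Int) : Decidable (Pre_trim_two_data data_1 data_2) := by unfold Pre_trim_two_data; infer_instance

def pvWitness_trim_two_data : List Int × List Int := ([1, 1, 1, 2, 2, 3], [10, 11, 12, 13, 14, 15])

def Spec_trim_two_data (data_1 : List Int) (data_2 : List Int) (out : List Int × List Int) : Prop := out = trim_two_data_alt data_1 data_2
instance (data_1 : List Int) (data_2 : List Int) (out : List Int × List Int) : Decidable (Spec_trim_two_data data_1 data_2 out) := by unfold Spec_trim_two_data; infer_instance

-- ===== CLAIM (what is proved, stated in full; the proofs are below) =====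
def Claim_equal_trim_two_data : Prop := ∀ (data_1 : List Int) (data_2 : List Int), Dom_trim_two_data data_1 data_2 → Pre_trim_two_data data_1 data_2 → Spec_trim_two_data data_1 data_2 (trim_two_data data_1 data_2)

-- ===== LEMMAS AND PROOFS =====

/-- The keep predicate implicit in A's branch structure. -/
def keepb (d : List Int) (i : Nat) : Bool :=
  i == 0 || i == d.length - 1 ||
    !(d.getD i 0 == d.getD (i+1) 0 && d.getD i 0 == d.getD (i-1) 0)

theorem trimA_foldl (d1 d2 : List Int) (l : List Nat) (a b : List Int) :
    l.foldl
      (fun (acc : List Int × List Int) i =>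
        if i = 0 then
          (acc.1 ++ [d1.getD i 0], acc.2 ++ [d2.getD i 0])
        else if i = d1.length - 1 then
          (acc.1 ++ [d1.getD i 0], acc.2 ++ [d2.getD i 0])
        else if ¬ (d1.getD i 0 = d1.getD (i+1) 0 ∧ d1.getD i 0 = d1.getD (i-1) 0) then
          (acc.1 ++ [d1.getD i 0], acc.2 ++ [d2.getD i 0])
        else acc)
      (a, b)
    = (a ++ (l.filter (keepb d1)).map (fun i => d1.getD i 0),
       b ++ (l.filter (keepb d1)).map (fun i => d2.getD i 0)) := by
  induction l generalizing a b with
  | nil => simp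
  | cons x xs ih =>
    simp only [List.foldl_cons, List.filter_cons]
    by_cases hk : keepb d1 x = true
    · have : (if x = 0 then ((a ++ [d1.getD x 0], b ++ [d2.getD x 0]) : List Int × List Int)
          else if x = d1.length - 1 then (a ++ [d1.getD x 0], b ++ [d2.getD x 0])
          else if ¬ (d1.getD x 0 = d1.getD (x+1) 0 ∧ d1.getD x 0 = d1.getD (x-1) 0) then
            (a ++ [d1.getD x 0], b ++ [d2.getD x 0])
          else (a, b)) = (a ++ [d1.getD x 0], b ++ [d2.getD x 0]) := by
        simp only [keepb, Bool.or_eq_true, beq_iff_eq, Bool.not_eq_true',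
          Bool.and_eq_false_iff, beq_eq_false_iff_ne] at hk
        split_ifs with h1 h2 h3 <;> first | rfl | (exfalso; tauto)
      rw [this, ih, hk]
      simp [List.append_assoc]
    · have : (if x = 0 then ((a ++ [d1.getD x 0], b ++ [d2.getD x 0]) : List Int × List Int)
          else if x = d1.length - 1 then (a ++ [d1.getD x 0], b ++ [d2.getD x 0])
          else if ¬ (d1.getD x 0 = d1.getD (x+1) 0 ∧ d1.getD x 0 = d1.getD (x-1) 0) then
            (a ++ [d1.getD x 0], b ++ [d2.getD x 0])
          else (a, b)) = (a, b) := by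
        have hk' : (¬ x = 0 ∧ ¬ x = d1.length - 1) ∧
            (d1.getD x 0 = d1.getD (x+1) 0 ∧ d1.getD x 0 = d1.getD (x-1) 0) := by
          simpa [keepb, not_or, Decidable.not_not] using hk
        obtain ⟨⟨h1, h2⟩, h3⟩ := hk'
        split_ifs with g1 g2 g3 <;> first | rfl | (exfalso; tauto)
      rw [this, ih]
      simp [hk]

theorem trimA_eq_filter (d1 d2 : List Int) :
    trim_two_data d1 d2
    = (((List.range d1.length).filter (keepb d1)).map (fun i => d1.getD i 0),
       ((List.range d1.length).filter (keepb d1)).map (fun i => d2.getD i 0)) := by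
  unfold trim_two_data
  simpa using trimA_foldl d1 d2 (List.range d1.length) [] []

theorem bRunEnd_lt (d : List Int) (v : Int) (e : Nat) (h : e < d.length) :
    bRunEnd d v e < d.length := by
  fun_induction bRunEnd with
  | case1 e h1 h2 ih => exact ih (by omega)
  | case2 => omega
  | case3 => omega

theorem bRunEnd_val (d : List Int) (v : Int) (e : Nat) :
    ∀ j, e < j → j ≤ bRunEnd d v e → d.getD j 0 = v := by
  fun_induction bRunEnd with
  | case1 e h1 h2 ih =>
    intro j hj1 hj2
    rcases Nat.eq_or_lt_of_le (Nat.succ_le_of_lt hj1) with h | h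
    · rw [← h]; exact h2
    · exact ih j h hj2
  | case2 e h1 h2 =>
    intro j hj1 hj2; omega
  | case3 e h1 =>
    intro j hj1 hj2; omega

theorem bRunEnd_stop (d : List Int) (v : Int) (e : Nat) :
    d.length ≤ bRunEnd d v e + 1 ∨ d.getD (bRunEnd d v e + 1) 0 ≠ v := by
  fun_induction bRunEnd with
  | case1 e h1 h2 ih => exact ih
  | case2 e h1 h2 => right; simpa using h2
  | case3 e h1 => left; omega

/-- filter over a run of consecutive indices where only the last one is kept -/
theorem filter_iff_last (p : Nat → Bool) :
    ∀ (m a : Nat), (∀ j, a ≤ j → j < a + m → (p j = true ↔ j = a + m - 1)) →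
      (List.range' a m).filter p = if m = 0 then [] else [a + m - 1] := by
  intro m
  induction m with
  | zero => intro a _; simp
  | succ k ih =>
    intro a hp
    rw [List.range'_succ, List.filter_cons]
    by_cases hk : k = 0
    · subst hk
      have : p a = true := (hp a le_rfl (by omega)).2 (by omega)
      simp [this]
    · have hpa : p a = false := by
        have := hp a le_rfl (by omega)
        simp only [Bool.not_eq_true] at *
        by_contra hc
        simp only [Bool.not_eq_false] at hc
        have := this.1 hc
        omega
      rw [hpa]
      have := ih (a + 1) (fun j hj1 hj2 => by
        have := hp j (by omega) (by omega)
        constructor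
        · intro h; have := this.1 h; omega
        · intro h; exact this.2 (by omega))
      simp only [this, if_neg hk]
      have h2 : a + 1 + k - 1 = a + (k + 1) - 1 := by omega
      simp [h2]

theorem bKept_eq (d : List Int) (s : Nat)
    (hinv : s < d.length → (s = 0 ∨ d.getD (s-1) 0 ≠ d.getD s 0)) :
    bKept d s = (List.range' s (d.length - s)).filter (keepb d) := by
  rw [bKept]
  split
  case isTrue h =>
    set v := d.getD s 0 with hv
    set e := bRunEnd d v s with he
    have hse : s ≤ e := bRunEnd_ge d v s
    have hen : e < d.length := bRunEnd_lt d v s h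
    have hval : ∀ j, s ≤ j → j ≤ e → d.getD j 0 = v := by
      intro j hj1 hj2
      rcases Nat.eq_or_lt_of_le hj1 with h' | h'
      · rw [← h']
      · exact bRunEnd_val d v s j h' hj2
    have hstop := bRunEnd_stop d v s
    -- split the index range at e+1
    have hsplit : List.range' s (d.length - s)
        = List.range' s (e + 1 - s) ++ List.range' (e + 1) (d.length - (e + 1)) := by
      have : List.range' s (e + 1 - s) ++ List.range' (s + (e + 1 - s)) (d.length - (e + 1))
          = List.range' s ((e + 1 - s) + (d.length - (e + 1))) := List.range'_append_1
      rw [show s + (e + 1 - s) = e + 1 by omega] at this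
      rw [show d.length - s = (e + 1 - s) + (d.length - (e + 1)) by omega]
      exact this.symm
    rw [hsplit, List.filter_append]
    -- the tail is the recursive call, by induction hypothesis
    have htail : bKept d (e + 1) = (List.range' (e + 1) (d.length - (e + 1))).filter (keepb d) := by
      apply bKept_eq
      intro h'
      right
      have h1 : d.getD e 0 = v := hval e hse le_rfl
      have h2 : d.getD (e + 1) 0 ≠ v := by
        rcases hstop with h2 | h2
        · omega
        · exact h2
      intro hc
      rw [Nat.add_sub_cancel] at hc
      exact h2 (by rw [← hc, h1])
    -- the head segment: keep s, drop interior, keep e (if distinct)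
    have hkeep_s : keepb d s = true := by
      rcases hinv h with h0 | hne
      · simp [keepb, h0]
      · have hc : ¬ (d.getD s 0 == d.getD (s+1) 0 && d.getD s 0 == d.getD (s-1) 0) = true := by
          simp only [Bool.and_eq_true, beq_iff_eq]
          intro hx
          exact hne hx.2.symm
        have hc' : (!(d.getD s 0 == d.getD (s+1) 0 && d.getD s 0 == d.getD (s-1) 0)) = true := by
          simp only [Bool.not_eq_true']
          exact Bool.eq_false_iff.mpr hc
        simp only [keepb, Bool.or_eq_true]
        tauto
    have hkeep_e : keepb d e = true := by
      by_cases hlast : e = d.length - 1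
      · simp [keepb, hlast]
      · have h1 : d.getD e 0 = v := hval e hse le_rfl
        have h2 : d.getD (e + 1) 0 ≠ v := by
          rcases hstop with h2 | h2
          · omega
          · exact h2
        have hc : ¬ (d.getD e 0 == d.getD (e+1) 0 && d.getD e 0 == d.getD (e-1) 0) = true := by
          simp only [Bool.and_eq_true, beq_iff_eq]
          intro hx
          exact h2 (by rw [← hx.1, h1])
        have hc' : (!(d.getD e 0 == d.getD (e+1) 0 && d.getD e 0 == d.getD (e-1) 0)) = true := by
          simp only [Bool.not_eq_true']
          exact Bool.eq_false_iff.mpr hc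
        simp only [keepb, Bool.or_eq_true]
        tauto
    have hdrop : ∀ j, s < j → j < e → keepb d j = false := by
      intro j hj1 hj2
      simp only [keepb, Bool.or_eq_false_iff, beq_eq_false_iff_ne,
        Bool.not_eq_false', Bool.and_eq_true, beq_iff_eq]
      refine ⟨⟨by omega, by omega⟩, ?_, ?_⟩
      · rw [hval j (by omega) (by omega), hval (j+1) (by omega) (by omega)]
      · rw [hval j (by omega) (by omega), hval (j-1) (by omega) (by omega)]
    have hhead : (List.range' s (e + 1 - s)).filter (keepb d)
        = if e ≠ s then [s, e] else [s] := by
      have : List.range' s (e + 1 - s) = s :: List.range' (s + 1) (e - s) := by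
        rw [show e + 1 - s = (e - s) + 1 by omega, List.range'_succ]
      rw [this, List.filter_cons, hkeep_s]
      have := filter_iff_last (keepb d) (e - s) (s + 1) (fun j hj1 hj2 => by
        constructor
        · intro hk
          by_contra hne
          have := hdrop j (by omega) (by omega)
          rw [hk] at this; exact absurd this (by simp)
        · intro hj
          have : j = e := by omega
          rw [this]; exact hkeep_e)
      rw [this]
      by_cases hes : e = s
      · simp [hes]
      · have : ¬ (e - s = 0) := by omega
        simp only [if_neg this, if_neg (Ne.symm hes ∘ Eq.symm)]
        have : s + 1 + (e - s) - 1 = e := by omega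
        simp [hes, this]
    rw [hsplit] at *
    simp only [List.filter_append, hhead, htail]
  case isFalse h =>
    have : d.length - s = 0 := by omega
    simp [this]
termination_by d.length - s
decreasing_by
  have := bRunEnd_ge d (d.getD s 0) s
  omega

theorem bKept_zero (d : List Int) :
    bKept d 0 = (List.range d.length).filter (keepb d) := by
  rw [bKept_eq d 0 (fun _ => Or.inl rfl), List.range_eq_range']
  simp

-- ===== VERDICT (by name: the statement is the Claim_ definition above) =====
theorem trim_two_data_spec : Claim_equal_trim_two_data := by
  intro d1 d2 _ _
  unfold Spec_trim_two_data trim_two_data_alt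
  rw [trimA_eq_filter, bKept_zero]
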